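-- pv_equiv track=rewrite | github.com/flo-gehring/advent-of-code | 2025/07/puzzle.py | move_timelines
-- ===== SOURCE A (Python) =====
-- def move_timelines(to_line:int, timelines:list[list[int]], grid:list[str])->list[list[int]]:
--     timelines_out_of_bounds = 0
--     time_line = [0 for _ in list(grid[to_line]) ]
--     previous_step_timeline = timelines[-1]
--     for  idx in range(len(previous_step_timeline)):
--         if grid[to_line][idx] == "^":
--             left = idx -1
--             right = idx +1
--             if left >= 0:
--                 assert grid[to_line][left] != "^"
--                 time_line[left] = time_line[left] +  previous_step_timeline[idx]
--             if left < 0: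
--                 timelines_out_of_bounds +=  +  previous_step_timeline[idx]
--             if right < len(grid[to_line]):
--                 assert grid[to_line][right] != "^"
--                 time_line[right] = time_line[right] + previous_step_timeline[idx]
--             if right >= len(grid[to_line]):
--                 timelines_out_of_bounds +=  +  previous_step_timeline[idx]
--         else:
--             time_line[idx] += previous_step_timeline[idx]
--     return (timelines_out_of_bounds, time_line)
-- ===== SOURCE B (Python) =====
-- def move_timelines(to_line: int, timelines: list[list[int]], grid: list[str]):
--     row = grid[to_line]
--     prev = timelines[-1]
--     n = len(row)
--     m = len(prev)
--     time_line = [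
--         (prev[j] if j < m and row[j] != "^" else 0)
--         + (prev[j - 1] if j >= 1 and j - 1 < m and row[j - 1] == "^" else 0)
--         + (prev[j + 1] if j + 1 < m and row[j + 1] == "^" else 0)
--         for j in range(n)
--     ]
--     out_of_bounds = 0
--     for i in range(m):
--         if row[i] == "^":
--             if i == 0:
--                 out_of_bounds += prev[i]
--             else:
--                 assert row[i - 1] != "^"
--             if i == n - 1:
--                 out_of_bounds += prev[i]
--             elif i + 1 < n:
--                 assert row[i + 1] != "^"
--     return (out_of_bounds, time_line)
-- ===== Notes on version B (the rewrite author's own statement) =====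
-- stated objective: alternative
-- what changed: B is a gather: each output cell j is computed directly from its up-to-three sources (prev[j] if grid[j] is not '^', plus prev of any '^' neighbour), with a separate pass over the '^' cells that checks the no-adjacent-splitter invariant and sums out-of-bounds spills at the edges, instead of A's scatter that pushes each source into a mutable zero-initialised array.
import Mathlib
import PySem

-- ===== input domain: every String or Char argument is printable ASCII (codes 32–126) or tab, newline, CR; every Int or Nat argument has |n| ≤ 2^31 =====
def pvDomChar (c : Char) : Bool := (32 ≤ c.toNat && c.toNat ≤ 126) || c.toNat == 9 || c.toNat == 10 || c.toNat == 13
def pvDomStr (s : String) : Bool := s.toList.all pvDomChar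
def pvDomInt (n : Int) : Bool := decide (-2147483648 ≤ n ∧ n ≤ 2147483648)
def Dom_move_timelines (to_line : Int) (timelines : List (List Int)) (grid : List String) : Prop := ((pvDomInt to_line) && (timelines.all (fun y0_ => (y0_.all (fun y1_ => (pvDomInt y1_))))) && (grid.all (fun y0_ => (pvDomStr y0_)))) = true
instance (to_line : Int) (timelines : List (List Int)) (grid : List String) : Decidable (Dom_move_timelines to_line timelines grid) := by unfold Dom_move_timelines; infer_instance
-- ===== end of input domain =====

-- B rebuilds the row as a gather (each cell computed from its up-to-three sources) instead of A's
-- scatter of each source to its neighbours; objective: alternative decomposition, same O(n) cost.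
-- Like A, the Python B raises AssertionError on adjacent '^' cells (outside Pre_).

-- ===== PORT A =====
-- A's loop body: scatter previous_step_timeline[idx] to neighbours / itself, tracking out-of-bounds.
def pvStepA (row : List Char) (prev : List Int) (st : Int × List Int) (idx : Nat) : Int × List Int :=
  let v := prev[idx]?.getD 0
  if row[idx]?.getD ' ' = '^' then
    let st1 : Int × List Int :=
      if 1 ≤ idx then (st.1, st.2.set (idx - 1) ((st.2[idx - 1]?.getD 0) + v))
      else (st.1 + v, st.2)
    if idx + 1 < row.length then (st1.1, st1.2.set (idx + 1) ((st1.2[idx + 1]?.getD 0) + v))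
    else (st1.1 + v, st1.2)
  else (st.1, st.2.set idx ((st.2[idx]?.getD 0) + v))

def move_timelines (to_line : Int) (timelines : List (List Int)) (grid : List String) : Int × List Int :=
  let row : List Char := ((PySem.List.pyGet? grid to_line).getD "").toList
  let prev : List Int := (PySem.List.pyGet? timelines (-1)).getD []
  (List.range prev.length).foldl (pvStepA row prev) (0, List.replicate row.length 0)

-- ===== PORT B =====
-- B's gather: value of cell j from sources j (if not '^') and '^' neighbours j-1, j+1 (truncated at k = len(prev)).
def pvGather (row : List Char) (prev : List Int) (k j : Nat) : Int :=
  (if j < k ∧ row[j]?.getD ' ' ≠ '^' then prev[j]?.getD 0 else 0)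
  + (if 1 ≤ j ∧ j - 1 < k ∧ row[j - 1]?.getD ' ' = '^' then prev[j - 1]?.getD 0 else 0)
  + (if j + 1 < k ∧ row[j + 1]?.getD ' ' = '^' then prev[j + 1]?.getD 0 else 0)

-- B's out-of-bounds accumulation over the '^' cells (the in-bounds asserts raise, never change the value).
def pvOobStep (row : List Char) (prev : List Int) (acc : Int) (i : Nat) : Int :=
  if row[i]?.getD ' ' = '^' then
    acc + (if i = 0 then prev[i]?.getD 0 else 0)
        + (if (i : Int) = (row.length : Int) - 1 then prev[i]?.getD 0 else 0)
  else acc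

def move_timelines_alt (to_line : Int) (timelines : List (List Int)) (grid : List String) : Int × List Int :=
  let row : List Char := ((PySem.List.pyGet? grid to_line).getD "").toList
  let prev : List Int := (PySem.List.pyGet? timelines (-1)).getD []
  ((List.range prev.length).foldl (pvOobStep row prev) 0,
   (List.range row.length).map (pvGather row prev prev.length))

-- ===== PRECONDITION & SPEC =====
-- Pre_ excludes exactly the inputs where both Pythons raise: empty timelines / invalid to_line
-- (IndexError), a previous timeline longer than the row (IndexError), or a '^' with a '^'
-- neighbour (AssertionError in A and in B alike).
def Pre_move_timelines (to_line : Int) (timelines : List (List Int)) (grid : List String) : Prop :=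
  timelines ≠ [] ∧
  (PySem.List.pyGet? grid to_line).isSome ∧
  (let row : List Char := ((PySem.List.pyGet? grid to_line).getD "").toList
   let prev : List Int := (PySem.List.pyGet? timelines (-1)).getD []
   prev.length ≤ row.length ∧
   ∀ i < prev.length, row[i]?.getD ' ' = '^' →
     (1 ≤ i → row[i - 1]?.getD ' ' ≠ '^') ∧ (i + 1 < row.length → row[i + 1]?.getD ' ' ≠ '^'))
instance (to_line : Int) (timelines : List (List Int)) (grid : List String) : Decidable (Pre_move_timelines to_line timelines grid) := by unfold Pre_move_timelines; infer_instance
def pvWitness_move_timelines : Int × List (List Int) × List String := (0, [[1, 2, 3]], ["_^_"])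

def Spec_move_timelines (to_line : Int) (timelines : List (List Int)) (grid : List String) (out : Int × List Int) : Prop := out = move_timelines_alt to_line timelines grid
instance (to_line : Int) (timelines : List (List Int)) (grid : List String) (out : Int × List Int) : Decidable (Spec_move_timelines to_line timelines grid out) := by unfold Spec_move_timelines; infer_instance

-- ===== CLAIM (what is proved, stated in full; the proofs are below) =====
def Claim_equal_move_timelines : Prop := ∀ (to_line : Int) (timelines : List (List Int)) (grid : List String), Dom_move_timelines to_line timelines grid → Pre_move_timelines to_line timelines grid → Spec_move_timelines to_line timelines grid (move_timelines to_line timelines grid)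

-- ===== LEMMAS AND PROOFS =====

theorem pv_map_range_get {f : Nat → Int} {n i : Nat} (hi : i < n) (d : Int) :
    (((List.range n).map f)[i]?.getD d) = f i := by
  simp [hi]

theorem pv_map_range_set {f : Nat → Int} {n i : Nat} (hi : i < n) (v : Int) :
    ((List.range n).map f).set i v = (List.range n).map (fun j => if j = i then v else f j) := by
  apply List.ext_getElem (by simp)
  intro j h1 h2
  simp only [List.length_map, List.length_range] at h1
  simp only [List.getElem_set, List.getElem_map, List.getElem_range]
  by_cases h : i = j
  · rw [if_pos h, if_pos h.symm]
  · rw [if_neg h, if_neg (fun hh => h hh.symm)]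

theorem pvGather_zero (row : List Char) (prev : List Int) (j : Nat) :
    pvGather row prev 0 j = 0 := by
  simp [pvGather]

theorem pv_if_and2 {p q C : Prop} [Decidable p] [Decidable q] [Decidable C]
    (h : p ↔ q) (v : Int) : (if p ∧ C then v else 0) = (if q ∧ C then v else 0) :=
  if_congr (and_congr_left' h) rfl rfl

theorem pv_if_and3 {a p q C : Prop} [Decidable a] [Decidable p] [Decidable q] [Decidable C]
    (h : a → (p ↔ q)) (v : Int) : (if a ∧ p ∧ C then v else 0) = (if a ∧ q ∧ C then v else 0) :=
  if_congr (and_congr_right fun ha => and_congr_left' (h ha)) rfl rfl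

-- one scatter step changes the gathered value of cell j by exactly this delta
theorem pvGather_succ (row : List Char) (prev : List Int) (k j : Nat) :
    pvGather row prev (k + 1) j =
      pvGather row prev k j +
      (if row[k]?.getD ' ' = '^' then
         (if 1 ≤ k ∧ j = k - 1 then prev[k]?.getD 0 else 0)
         + (if j = k + 1 then prev[k]?.getD 0 else 0)
       else (if j = k then prev[k]?.getD 0 else 0)) := by
  unfold pvGather
  by_cases hc : row[k]?.getD ' ' = '^'
  · rw [if_pos hc]
    by_cases hj1 : j = k + 1
    · subst hj1
      rw [pv_if_and2 (show (k + 1 < k + 1) ↔ (k + 1 < k) by omega),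
          pv_if_and2 (show (k + 1 + 1 < k + 1) ↔ (k + 1 + 1 < k) by omega)]
      simp only [Nat.add_sub_cancel]
      rw [if_pos (⟨by omega, by omega, hc⟩ : 1 ≤ k + 1 ∧ k < k + 1 ∧ row[k]?.getD ' ' = '^'),
          if_neg (show ¬ (1 ≤ k + 1 ∧ k < k ∧ row[k]?.getD ' ' = '^') from
            fun h => absurd h.2.1 (by omega)),
          if_neg (show ¬ (1 ≤ k ∧ k + 1 = k - 1) by omega)]
      simp only [eq_self_iff_true, if_true]
      ring
    · by_cases hj2 : 1 ≤ k ∧ j = k - 1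
      · have e : j + 1 = k := by omega
        rw [pv_if_and2 (show (j < k + 1) ↔ (j < k) by omega),
            pv_if_and3 (fun _ => show (j - 1 < k + 1) ↔ (j - 1 < k) by omega), e]
        rw [if_pos (⟨by omega, hc⟩ : k < k + 1 ∧ row[k]?.getD ' ' = '^'),
            if_neg (show ¬ (k < k ∧ row[k]?.getD ' ' = '^') from fun h => absurd h.1 (by omega)),
            if_pos hj2, if_neg hj1]
        ring
      · by_cases hj3 : j = k
        · have hcj : row[j]?.getD ' ' = '^' := by rw [hj3]; exact hc
          rw [if_neg (show ¬ (j < k + 1 ∧ row[j]?.getD ' ' ≠ '^') from fun h => h.2 hcj),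
              if_neg (show ¬ (j < k ∧ row[j]?.getD ' ' ≠ '^') from fun h => h.2 hcj),
              pv_if_and3 (fun ha => show (j - 1 < k + 1) ↔ (j - 1 < k) by omega),
              pv_if_and2 (show (j + 1 < k + 1) ↔ (j + 1 < k) by omega),
              if_neg hj2, if_neg hj1]
          ring
        · rw [pv_if_and2 (show (j < k + 1) ↔ (j < k) by omega),
              pv_if_and3 (fun ha => show (j - 1 < k + 1) ↔ (j - 1 < k) by omega),
              pv_if_and2 (show (j + 1 < k + 1) ↔ (j + 1 < k) by omega),
              if_neg hj2, if_neg hj1]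
          ring
  · rw [if_neg hc]
    by_cases hjk : j = k
    · subst hjk
      rw [if_pos (⟨by omega, hc⟩ : j < j + 1 ∧ row[j]?.getD ' ' ≠ '^'),
          if_neg (show ¬ (j < j ∧ row[j]?.getD ' ' ≠ '^') from fun h => absurd h.1 (by omega)),
          pv_if_and3 (fun ha => show (j - 1 < j + 1) ↔ (j - 1 < j) by omega),
          pv_if_and2 (show (j + 1 < j + 1) ↔ (j + 1 < j) by omega),
          if_pos rfl]
      ring
    · have g2 : (1 ≤ j ∧ j - 1 < k + 1 ∧ row[j-1]?.getD ' ' = '^')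
          ↔ (1 ≤ j ∧ j - 1 < k ∧ row[j-1]?.getD ' ' = '^') := by
        constructor
        · rintro ⟨a, b, c⟩
          refine ⟨a, ?_, c⟩
          rcases Nat.lt_or_ge (j - 1) k with h3 | h3
          · exact h3
          · exact absurd ((show j - 1 = k by omega) ▸ c : row[k]?.getD ' ' = '^') hc
        · rintro ⟨a, b, c⟩; exact ⟨a, by omega, c⟩
      have g3 : (j + 1 < k + 1 ∧ row[j+1]?.getD ' ' = '^')
          ↔ (j + 1 < k ∧ row[j+1]?.getD ' ' = '^') := by
        constructor
        · rintro ⟨b, c⟩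
          refine ⟨?_, c⟩
          rcases Nat.lt_or_ge (j + 1) k with h3 | h3
          · exact h3
          · exact absurd ((show j + 1 = k by omega) ▸ c : row[k]?.getD ' ' = '^') hc
        · rintro ⟨b, c⟩; exact ⟨by omega, c⟩
      rw [pv_if_and2 (show (j < k + 1) ↔ (j < k) by omega),
          if_congr g2 rfl rfl, if_congr g3 rfl rfl, if_neg hjk]
      ring

theorem pv_invariant (row : List Char) (prev : List Int)
    (hmn : prev.length ≤ row.length) :
    ∀ k, k ≤ prev.length →
      (List.range k).foldl (pvStepA row prev) (0, List.replicate row.length 0)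
      = ((List.range k).foldl (pvOobStep row prev) 0,
         (List.range row.length).map (pvGather row prev k)) := by
  intro k
  induction k with
  | zero =>
      intro _
      refine congrArg (Prod.mk 0) ?_
      apply List.ext_getElem (by simp)
      intro j h1 h2
      simp [pvGather_zero]
  | succ k ih =>
      intro hk
      have hkm : k < prev.length := by omega
      have hkn : k < row.length := by omega
      rw [List.range_succ, List.foldl_append, List.foldl_append, ih (by omega)]
      simp only [List.foldl_cons, List.foldl_nil]
      by_cases hc : row[k]?.getD ' ' = '^'
      · simp only [pvStepA, pvOobStep, hc, if_pos]
        by_cases hl : 1 ≤ k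
        · have hk1 : k - 1 < row.length := by omega
          simp only [hl, if_pos]
          rw [pv_map_range_get hk1, pv_map_range_set hk1]
          by_cases hr : k + 1 < row.length
          · simp only [hr, if_pos]
            have hne : ¬ (k + 1 = k - 1) := by omega
            rw [pv_map_range_get hr, pv_map_range_set hr]
            simp only [hne, if_false]
            refine Prod.ext ?_ ?_
            · have h0 : ¬ (k = 0) := by omega
              have h1 : ¬ ((k : Int) = (row.length : Int) - 1) := by omega
              simp [h0, h1]
            · apply List.map_congr_left
              intro j hj
              rw [pvGather_succ, if_pos hc]
              by_cases hj1 : j = k + 1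
              · subst hj1; split_ifs <;> (try (exfalso; omega)) <;> ring
              · by_cases hj2 : j = k - 1
                · subst hj2; split_ifs <;> (try (exfalso; omega)) <;> ring
                · split_ifs <;> (try (exfalso; omega)) <;> ring
          · simp only [hr, if_neg, not_false_iff, if_false]
            refine Prod.ext ?_ ?_
            · have h0 : ¬ (k = 0) := by omega
              have h1 : (k : Int) = (row.length : Int) - 1 := by omega
              simp [h0, h1]
            · apply List.map_congr_left
              intro j hj
              have hjn : j < row.length := List.mem_range.mp hj
              rw [pvGather_succ, if_pos hc]
              have hj1 : ¬ (j = k + 1) := by omega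
              by_cases hj2 : j = k - 1
              · subst hj2; split_ifs <;> (try (exfalso; omega)) <;> ring
              · split_ifs <;> (try (exfalso; omega)) <;> ring
        · have hk0 : k = 0 := by omega
          subst hk0
          simp only [hl, if_neg, not_false_iff, if_false]
          by_cases hr : 0 + 1 < row.length
          · simp only [hr, if_pos]
            rw [pv_map_range_get hr, pv_map_range_set hr]
            refine Prod.ext ?_ ?_
            · have h1 : ¬ ((0 : Int) = (row.length : Int) - 1) := by omega
              simp [h1]
            · apply List.map_congr_left
              intro j hj
              rw [pvGather_succ, if_pos hc]
              by_cases hj1 : j = 0 + 1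
              · subst hj1; split_ifs <;> (try (exfalso; omega)) <;> ring
              · split_ifs <;> (try (exfalso; omega)) <;> ring
          · simp only [hr, if_neg, not_false_iff, if_false]
            refine Prod.ext ?_ ?_
            · have h1 : (0 : Int) = (row.length : Int) - 1 := by omega
              simp [h1]
            · apply List.map_congr_left
              intro j hj
              have hjn : j < row.length := List.mem_range.mp hj
              rw [pvGather_succ, if_pos hc]
              split_ifs <;> (try (exfalso; omega)) <;> ring
      · simp only [pvStepA, pvOobStep, hc, if_neg, not_false_iff, if_false]
        rw [pv_map_range_get hkn, pv_map_range_set hkn]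
        refine congrArg _ ?_
        apply List.map_congr_left
        intro j hj
        rw [pvGather_succ, if_neg hc]
        by_cases hjk : j = k
        · subst hjk; split_ifs <;> (try (exfalso; omega)) <;> ring
        · split_ifs <;> (try (exfalso; omega)) <;> ring

-- ===== VERDICT =====
theorem move_timelines_spec : Claim_equal_move_timelines := by
  intro to_line timelines grid _ hpre
  simp only [Pre_move_timelines] at hpre
  obtain ⟨-, -, hlen, -⟩ := hpre
  simp only [Spec_move_timelines, move_timelines, move_timelines_alt]
  exact pv_invariant _ _ hlen _ le_rfl
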